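-- pv_equiv track=rewrite | github.com/nexodifyforyou/perizia-v5-after-gpt | backend/customer_decision_contract.py | _normalize_page_list
-- ===== SOURCE A (Python) =====
-- from typing import Any, Dict, List, Optional
--
-- def _normalize_page_list(value: Any) -> List[int]:
--     pages: List[int] = []
--     if not isinstance(value, list):
--         return pages
--     for item in value:
--         try:
--             page = int(item)
--         except Exception:
--             continue
--         if page not in pages:
--             pages.append(page)
--     pages.sort()
--     return pages
-- ===== SOURCE B (Python) =====
-- from typing import Any, List
--
-- def _normalize_page_list(value: Any) -> List[int]:
--     if not isinstance(value, list):
--         return []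
--     pages: List[int] = []
--     for item in value:
--         try:
--             page = int(item)
--         except Exception:
--             continue
--         i = 0
--         while i < len(pages) and pages[i] < page:
--             i += 1
--         if i == len(pages) or pages[i] != page:
--             pages.insert(i, page)
--     return pages
-- ===== Notes on version B (the rewrite author's own statement) =====
-- stated objective: alternative
-- what changed: B keeps the accumulator sorted and duplicate-free at all times by inserting each converted int at its position (insertion sort with in-place dedup), so there is no membership test and no terminal sort; A appends after a full linear membership scan and sorts at the end.
import Mathlib
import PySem

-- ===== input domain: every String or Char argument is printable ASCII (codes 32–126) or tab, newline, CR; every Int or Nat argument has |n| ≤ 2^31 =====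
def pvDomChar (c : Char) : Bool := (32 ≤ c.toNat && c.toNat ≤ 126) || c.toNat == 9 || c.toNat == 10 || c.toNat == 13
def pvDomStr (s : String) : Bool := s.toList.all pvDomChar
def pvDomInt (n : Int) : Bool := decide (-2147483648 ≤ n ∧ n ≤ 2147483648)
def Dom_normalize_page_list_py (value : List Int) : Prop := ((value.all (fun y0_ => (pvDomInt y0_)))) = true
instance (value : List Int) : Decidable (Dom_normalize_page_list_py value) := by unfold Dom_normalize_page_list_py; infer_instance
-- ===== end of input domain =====

-- ===== PORT A =====
-- One honest line: B maintains a sorted duplicate-free accumulator by positional insertion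
-- (insertion sort with dedup) instead of A's membership-scan append plus terminal sort (objective: alternative, similar cost).
-- On List Int inputs int(item) never raises, so A's try/except is the identity step.
def normalize_page_list_py (value : List Int) : List Int :=
  let pages : List Int :=
    value.foldl (fun pages page =>
      if pages.contains page then pages else pages ++ [page]) []
  PySem.List.sorted pages (fun x => x) false

-- ===== PORT B =====
-- the `while i < len(pages) and pages[i] < page: i += 1` scan of Source B
def pvScanPos : List Int -> Int -> Nat
  | [], _ => 0
  | x :: xs, p => if x < p then pvScanPos xs p + 1 else 0

def normalize_page_list_py_alt (value : List Int) : List Int :=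
  value.foldl (fun pages page =>
    let i := pvScanPos pages page
    if i = pages.length ∨ pages.getD i 0 ≠ page then
      PySem.List.insert pages (i : Int) page
    else pages) []

-- ===== PRECONDITION & SPEC =====
def Spec_normalize_page_list_py (value : List Int) (out : List Int) : Prop := out = normalize_page_list_py_alt value
instance (value : List Int) (out : List Int) : Decidable (Spec_normalize_page_list_py value out) := by unfold Spec_normalize_page_list_py; infer_instance

-- ===== CLAIM (what is proved, stated in full; the proofs are below) =====
def Claim_equal_normalize_page_list_py : Prop := ∀ (value : List Int), Dom_normalize_page_list_py value → Spec_normalize_page_list_py value (normalize_page_list_py value)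

-- ===== LEMMAS AND PROOFS =====

-- ===== VERDICT (by name: the statement is the Claim_ definition above) =====
-- proof-side helpers
def pvStepA (pages : List Int) (page : Int) : List Int :=
  if pages.contains page then pages else pages ++ [page]

def pvStepB (pages : List Int) (page : Int) : List Int :=
  if pvScanPos pages page = pages.length ∨ pages.getD (pvScanPos pages page) 0 ≠ page then
    PySem.List.insert pages ((pvScanPos pages page : Nat) : Int) page
  else pages

-- clean recursive description of one B step
def pvInsU : List Int -> Int -> List Int
  | [], p => [p]
  | x :: xs, p => if x < p then x :: pvInsU xs p else if x = p then x :: xs else p :: x :: xs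

theorem pvScanPos_le (l : List Int) (p : Int) : pvScanPos l p ≤ l.length := by
  induction l with
  | nil => simp [pvScanPos]
  | cons x xs ih => simp only [pvScanPos]; split; · simp; omega
                    · simp

theorem pvStepB_eq_insU (l : List Int) (p : Int) : pvStepB l p = pvInsU l p := by
  induction l with
  | nil =>
    simp [pvStepB, pvScanPos, pvInsU, PySem.List.insert_zero]
  | cons x xs ih =>
    by_cases hx : x < p
    · have hle := pvScanPos_le xs p
      have hpos : pvScanPos (x :: xs) p = pvScanPos xs p + 1 := by
        simp [pvScanPos, hx]
      have hcondiff : (pvScanPos xs p + 1 = (x :: xs).length ∨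
            (x :: xs).getD (pvScanPos xs p + 1) 0 ≠ p) ↔
          (pvScanPos xs p = xs.length ∨ xs.getD (pvScanPos xs p) 0 ≠ p) := by
        simp [List.length_cons]
      have hins : PySem.List.insert (x :: xs) ((pvScanPos xs p + 1 : Nat) : Int) p
          = x :: PySem.List.insert xs ((pvScanPos xs p : Nat) : Int) p := by
        rw [PySem.List.insert_natCast _ _ _ (by simpa using hle),
            PySem.List.insert_natCast _ _ _ hle]
        simp
      simp only [pvStepB, pvInsU, hpos, if_pos hx]
      by_cases hcond : pvScanPos xs p = xs.length ∨ xs.getD (pvScanPos xs p) 0 ≠ p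
      · rw [if_pos (hcondiff.2 hcond), hins]
        have hxs : PySem.List.insert xs ((pvScanPos xs p : Nat) : Int) p = pvInsU xs p := by
          rw [← ih]; simp only [pvStepB]; rw [if_pos hcond]
        rw [hxs]
      · rw [if_neg (fun h => hcond (hcondiff.1 h))]
        have hxs : xs = pvInsU xs p := by
          rw [← ih]; simp only [pvStepB]; rw [if_neg hcond]
        rw [← hxs]
    · have hpos : pvScanPos (x :: xs) p = 0 := by simp [pvScanPos, hx]
      by_cases hxp : x = p
      · have hcond : ¬ ((0 : Nat) = (x :: xs).length ∨ (x :: xs).getD 0 0 ≠ p) := by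
          simp [hxp]
        simp only [pvStepB, pvInsU, hpos]
        rw [if_neg (by simpa using hcond), if_neg hx, if_pos hxp]
      · simp only [pvStepB, pvInsU, hpos]
        rw [if_pos (by simp [hxp]), PySem.List.insert_natCast _ 0 _ (by simp),
            if_neg hx, if_neg hxp]
        simp

theorem mem_pvInsU {y : Int} (l : List Int) (p : Int) : y ∈ pvInsU l p ↔ y = p ∨ y ∈ l := by
  induction l with
  | nil => simp [pvInsU]
  | cons x xs ih =>
    simp only [pvInsU]
    by_cases h1 : x < p
    · rw [if_pos h1]; simp [ih]; tauto
    · rw [if_neg h1]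
      by_cases h2 : x = p
      · subst h2; simp
      · rw [if_neg h2]; simp

theorem pairwise_pvInsU (l : List Int) (p : Int) (h : l.Pairwise (· < ·)) :
    (pvInsU l p).Pairwise (· < ·) := by
  induction l with
  | nil => simp [pvInsU]
  | cons x xs ih =>
    rcases List.pairwise_cons.1 h with ⟨hx, hxs⟩
    simp only [pvInsU]
    split_ifs with h1 h2
    · refine List.pairwise_cons.2 ⟨?_, ih hxs⟩
      intro y hy
      rcases (mem_pvInsU xs p).1 hy with rfl | hy
      · exact h1
      · exact hx y hy
    · exact h
    · refine List.pairwise_cons.2 ⟨?_, h⟩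
      intro y hy
      rcases List.mem_cons.1 hy with rfl | hy
      · omega
      · exact lt_trans (by omega) (hx y hy)

theorem pvInsU_of_mem (l : List Int) (p : Int) (h : l.Pairwise (· < ·)) (hm : p ∈ l) :
    pvInsU l p = l := by
  induction l with
  | nil => simp at hm
  | cons x xs ih =>
    rcases List.pairwise_cons.1 h with ⟨hx, hxs⟩
    rcases List.mem_cons.1 hm with rfl | hm
    · simp [pvInsU]
    · have hlt : x < p := hx p hm
      simp [pvInsU, hlt, ih hxs hm]

theorem pvInsU_perm_of_not_mem (l : List Int) (p : Int) (hm : p ∉ l) :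
    (pvInsU l p).Perm (l ++ [p]) := by
  induction l with
  | nil => simp [pvInsU]
  | cons x xs ih =>
    have hxp : x ≠ p := fun h => hm (h ▸ List.mem_cons_self)
    have hm' : p ∉ xs := fun h => hm (List.mem_cons_of_mem _ h)
    simp only [pvInsU]
    by_cases h1 : x < p
    · rw [if_pos h1]; exact (ih hm').cons x
    · rw [if_neg h1, if_neg hxp]
      exact (List.perm_append_singleton p (x :: xs)).symm

theorem pv_main (value Aacc Bacc : List Int)
    (hs : Bacc.Pairwise (· < ·)) (hp : Bacc.Perm Aacc) :
    (value.foldl pvStepB Bacc).Pairwise (· < ·) ∧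
    (value.foldl pvStepB Bacc).Perm (value.foldl pvStepA Aacc) := by
  induction value generalizing Aacc Bacc with
  | nil => exact ⟨hs, hp⟩
  | cons p rest ih =>
    simp only [List.foldl_cons]
    have hmem : p ∈ Bacc ↔ p ∈ Aacc := hp.mem_iff
    by_cases hpB : p ∈ Bacc
    · have hB : pvStepB Bacc p = Bacc := by
        rw [pvStepB_eq_insU]; exact pvInsU_of_mem _ _ hs hpB
      have hA : pvStepA Aacc p = Aacc := by
        simp [pvStepA, hmem.1 hpB]
      rw [hB, hA]; exact ih Aacc Bacc hs hp
    · have hB : pvStepB Bacc p = pvInsU Bacc p := pvStepB_eq_insU _ _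
      have hA : pvStepA Aacc p = Aacc ++ [p] := by
        simp only [pvStepA]
        rw [if_neg]
        simp only [List.contains_iff_mem]
        exact fun h => hpB (hmem.2 h)
      rw [hB, hA]
      refine ih _ _ (pairwise_pvInsU _ _ hs) ?_
      exact (pvInsU_perm_of_not_mem Bacc p hpB).trans (hp.append_right [p])

-- ===== VERDICT (by name: the statement is the Claim_ definition above) =====
theorem normalize_page_list_py_spec : Claim_equal_normalize_page_list_py := by
  intro value _
  show normalize_page_list_py value = normalize_page_list_py_alt value
  unfold normalize_page_list_py normalize_page_list_py_alt
  have hA : (value.foldl (fun pages page =>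
      if pages.contains page then pages else pages ++ [page]) []) = value.foldl pvStepA [] := rfl
  have hB : (value.foldl (fun pages page =>
      let i := pvScanPos pages page
      if i = pages.length ∨ pages.getD i 0 ≠ page then
        PySem.List.insert pages (i : Int) page
      else pages) []) = value.foldl pvStepB [] := rfl
  rw [hA, hB]
  obtain ⟨hsorted, hperm⟩ := pv_main value [] [] (by simp) (List.Perm.refl [])
  exact PySem.List.sorted_eq_of_perm_of_pairwise_lt _ _ _ hperm hsorted
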